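-- pv_equiv track=rewrite | github.com/ghensley1098/Zero-Divisor-Graph-Catalog | catalog.py | get_exact_zero_divisors
-- ===== SOURCE A (Python) =====
-- def get_ann(x, n, zero_divisors):
--     """
--     Calculates ann(x) for a given x in Z_n.
--     ann(x) is the set of all y such that (x, y) is a zero divisor pair.
--     """
--     ann_x = set()
--     for a, b in zero_divisors:
--         if a == x:
--             ann_x.add(b)
--     return ann_x
--
-- def get_ann_of_set(s, n, zero_divisors):
--     """
--     Calculates ann({x, y, z, ...}) for a given set in Z_n.
--     This is the intersection of ann(i) for all i in the set.
--     """
--     if not s: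
--         return set(range(n))
--
--     ann_sets = [get_ann(i, n, zero_divisors) for i in s]
--
--     intersection = ann_sets[0]
--     for i in range(1, len(ann_sets)):
--         intersection = intersection.intersection(ann_sets[i])
--
--     return intersection
--
-- def get_exact_zero_divisors(n, zero_divisors):
--     """
--     Finds all exact zero divisor pairs (x, y) in Z_n.
--     (x, y) is an exact zero divisor pair if ann(x) == ann(ann(y)).
--     """
--     exact_zero_divisors = []
--     all_anns = {i: get_ann(i, n, zero_divisors) for i in range(n)}
--     all_ann_anns = {i: get_ann_of_set(all_anns[i], n, zero_divisors) for i in range(n)}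
--
--     for x in range(n):
--         for y in range(n):
--             if all_anns[x] == all_ann_anns[y]:
--                 exact_zero_divisors.append((x, y))
--     return exact_zero_divisors
-- ===== SOURCE B (Python) =====
-- def get_exact_zero_divisors(n, zero_divisors):
--     # One-pass ann dict, group y's by the sorted ann(ann(y)) key, then lookup per x.
--     ann_map = {}
--     for a, b in zero_divisors:
--         ann_map.setdefault(a, set()).add(b)
--     empty = set()
--     full_key = tuple(range(n))
--     groups = {}
--     for y in range(n):
--         s = ann_map.get(y, empty)
--         if s:
--             inter = None
--             for i in s:
--                 t = ann_map.get(i, empty)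
--                 inter = set(t) if inter is None else inter & t
--             key = tuple(sorted(inter))
--         else:
--             key = full_key
--         groups.setdefault(key, []).append(y)
--     out = []
--     for x in range(n):
--         for y in groups.get(tuple(sorted(ann_map.get(x, empty))), ()):
--             out.append((x, y))
--     return out
-- ===== Notes on version B (the rewrite author's own statement) =====
-- stated objective: faster
-- what changed: B builds the annihilator map in a single pass over zero_divisors, computes each ann(ann(y)) once, groups the y's in a dict keyed by the sorted ann(ann(y)) tuple, and emits matches for each x by one dict lookup, instead of A's recomputation of ann by scanning zero_divisors for every element and its n*n pairwise set comparisons.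
import Mathlib
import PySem

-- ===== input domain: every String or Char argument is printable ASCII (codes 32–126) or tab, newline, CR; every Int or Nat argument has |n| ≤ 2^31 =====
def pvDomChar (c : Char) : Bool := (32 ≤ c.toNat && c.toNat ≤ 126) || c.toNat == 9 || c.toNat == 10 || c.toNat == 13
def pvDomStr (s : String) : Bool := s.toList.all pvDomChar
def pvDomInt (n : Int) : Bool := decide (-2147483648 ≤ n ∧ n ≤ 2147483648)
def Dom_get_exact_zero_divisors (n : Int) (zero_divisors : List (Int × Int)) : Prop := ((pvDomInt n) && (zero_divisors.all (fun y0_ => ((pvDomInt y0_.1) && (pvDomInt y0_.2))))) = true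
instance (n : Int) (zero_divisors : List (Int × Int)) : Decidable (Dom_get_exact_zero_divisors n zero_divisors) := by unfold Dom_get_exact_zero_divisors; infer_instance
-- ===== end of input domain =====

-- B replaces A's repeated rescans of zero_divisors and n*n pairwise set comparisons by one
-- annihilator dict built in a single pass plus a dict grouping the y's by their sorted
-- ann(ann(y)) key, looked up once per x (objective: faster).

-- ===== PORT A =====
def get_ann (x : Int) (n : Int) (zero_divisors : List (Int × Int)) : PySem.Set Int :=
  zero_divisors.foldl
    (fun ann_x p => if p.1 == x then PySem.Set.add ann_x p.2 else ann_x)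
    PySem.Set.empty

def get_ann_of_set (s : PySem.Set Int) (n : Int) (zero_divisors : List (Int × Int)) : PySem.Set Int :=
  if s = [] then PySem.Set.ofList (PySem.List.pyRange 0 n)
  else
    let ann_sets := s.map (fun i => get_ann i n zero_divisors)
    (PySem.List.pyRange 1 (PySem.List.len ann_sets)).foldl
      (fun intersection i => PySem.Set.inter intersection (PySem.List.pyGetD ann_sets i []))
      (PySem.List.pyGetD ann_sets 0 [])

def get_exact_zero_divisors (n : Int) (zero_divisors : List (Int × Int)) : List (Int × Int) :=
  let all_anns : PySem.Dict Int (PySem.Set Int) :=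
    (PySem.List.pyRange 0 n).foldl
      (fun d i => d.insert i (get_ann i n zero_divisors)) PySem.Dict.empty
  let all_ann_anns : PySem.Dict Int (PySem.Set Int) :=
    (PySem.List.pyRange 0 n).foldl
      (fun d i => d.insert i (get_ann_of_set (all_anns.getD i PySem.Set.empty) n zero_divisors))
      PySem.Dict.empty
  (PySem.List.pyRange 0 n).foldl
    (fun acc x =>
      (PySem.List.pyRange 0 n).foldl
        (fun acc y =>
          if PySem.Set.equal (all_anns.getD x PySem.Set.empty) (all_ann_anns.getD y PySem.Set.empty)
          then acc ++ [(x, y)] else acc)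
        acc)
    []

-- ===== PORT B =====
-- ann_map.setdefault(a, set()).add(b) over one pass of zero_divisors
def pvAnnMap (zero_divisors : List (Int × Int)) : PySem.Dict Int (PySem.Set Int) :=
  zero_divisors.foldl
    (fun d p => d.modify p.1 PySem.Set.empty (fun s => PySem.Set.add s p.2))
    PySem.Dict.empty

-- the grouping key of y: tuple(sorted(ann(ann(y)))), with tuple(range(n)) for empty ann(y)
def pvAnnAnnKey (n : Int) (ann_map : PySem.Dict Int (PySem.Set Int)) (y : Int) : List Int :=
  match ann_map.getD y PySem.Set.empty with
  | [] => PySem.List.pyRange 0 n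
  | h :: t =>
    PySem.List.sorted
      (t.foldl (fun inter i => PySem.Set.inter inter (ann_map.getD i PySem.Set.empty))
        (PySem.Set.ofList (ann_map.getD h PySem.Set.empty)))
      (fun v => v)

def get_exact_zero_divisors_alt (n : Int) (zero_divisors : List (Int × Int)) : List (Int × Int) :=
  let ann_map := pvAnnMap zero_divisors
  let groups : PySem.Dict (List Int) (List Int) :=
    (PySem.List.pyRange 0 n).foldl
      (fun d y => d.modify (pvAnnAnnKey n ann_map y) [] (fun l => l ++ [y]))
      PySem.Dict.empty
  (PySem.List.pyRange 0 n).foldl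
    (fun out x =>
      (groups.getD (PySem.List.sorted (ann_map.getD x PySem.Set.empty) (fun v => v)) []).foldl
        (fun out y => out ++ [(x, y)]) out)
    []

-- ===== PRECONDITION & SPEC =====
def Spec_get_exact_zero_divisors (n : Int) (zero_divisors : List (Int × Int)) (out : List (Int × Int)) : Prop := out = get_exact_zero_divisors_alt n zero_divisors
instance (n : Int) (zero_divisors : List (Int × Int)) (out : List (Int × Int)) : Decidable (Spec_get_exact_zero_divisors n zero_divisors out) := by unfold Spec_get_exact_zero_divisors; infer_instance

-- ===== CLAIM (what is proved, stated in full; the proofs are below) =====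
def Claim_equal_get_exact_zero_divisors : Prop := ∀ (n : Int) (zero_divisors : List (Int × Int)), Dom_get_exact_zero_divisors n zero_divisors → Spec_get_exact_zero_divisors n zero_divisors (get_exact_zero_divisors n zero_divisors)

-- ===== LEMMAS AND PROOFS =====

-- L1: the one-pass dict of B agrees pointwise with A's per-x scan of zero_divisors
theorem pvAnnMap_getD_aux (zero_divisors : List (Int × Int)) (x : Int)
    (d : PySem.Dict Int (PySem.Set Int)) :
    (zero_divisors.foldl (fun d p => d.modify p.1 PySem.Set.empty (fun s => PySem.Set.add s p.2)) d).getD x PySem.Set.empty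
    = zero_divisors.foldl (fun s p => if p.1 == x then PySem.Set.add s p.2 else s) (d.getD x PySem.Set.empty) := by
  induction zero_divisors generalizing d with
  | nil => rfl
  | cons p l ih =>
    simp only [List.foldl_cons, ih]
    by_cases hx : x = p.1
    · subst hx
      rw [PySem.Dict.getD_modify_self]
      simp
    · rw [PySem.Dict.getD_modify_of_ne _ _ _ hx]
      have : (p.1 == x) = false := by simp; omega
      simp [this]

theorem pvAnnMap_getD (zero_divisors : List (Int × Int)) (x n : Int) :
    (pvAnnMap zero_divisors).getD x PySem.Set.empty = get_ann x n zero_divisors := by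
  unfold pvAnnMap get_ann
  rw [pvAnnMap_getD_aux]
  rfl

-- L2: get_ann is duplicate-free
theorem nodup_get_ann (x n : Int) (zero_divisors : List (Int × Int)) :
    (get_ann x n zero_divisors).Nodup := by
  unfold get_ann
  generalize hs : (PySem.Set.empty : PySem.Set Int) = s0
  have h0 : s0.Nodup := by rw [← hs]; exact List.nodup_nil
  clear hs
  induction zero_divisors generalizing s0 with
  | nil => exact h0
  | cons p l ih =>
    simp only [List.foldl_cons]
    by_cases hp : (p.1 == x) = true
    · simp only [hp, if_true]; exact ih _ (PySem.Set.nodup_add _ _ h0)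
    · simp only [hp]; exact ih _ h0

-- L3: A's indexed intersection loop is a head/tail fold
theorem get_ann_of_set_cons (h : Int) (t : List Int) (n : Int) (zero_divisors : List (Int × Int)) :
    get_ann_of_set (h :: t) n zero_divisors =
      t.foldl (fun inter i => PySem.Set.inter inter (get_ann i n zero_divisors))
        (get_ann h n zero_divisors) := by
  unfold get_ann_of_set
  simp only [if_false, reduceCtorEq]
  rw [PySem.List.foldl_pyRange_pyGetD _ [] _ _ (by norm_num)]
  simp [List.foldl_map]

-- intersecting preserves Nodup through the fold
theorem nodup_inter_foldl (t : List Int) (g : Int → PySem.Set Int) (init : PySem.Set Int)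
    (hi : init.Nodup) :
    (t.foldl (fun inter i => PySem.Set.inter inter (g i)) init).Nodup := by
  induction t generalizing init with
  | nil => exact hi
  | cons a t ih => exact ih _ (PySem.Set.nodup_inter _ _ hi)

theorem nodup_get_ann_of_set (s : PySem.Set Int) (n : Int) (zero_divisors : List (Int × Int)) :
    (get_ann_of_set s n zero_divisors).Nodup := by
  cases s with
  | nil => simpa [get_ann_of_set] using PySem.Set.nodup_ofList (PySem.List.pyRange 0 n)
  | cons h t =>
    rw [get_ann_of_set_cons]
    exact nodup_inter_foldl _ _ _ (nodup_get_ann h n zero_divisors)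

-- L4: Python set equality is equality of sorted element lists (for duplicate-free lists)
theorem set_equal_iff_sorted_eq (s t : PySem.Set Int) (hs : s.Nodup) (ht : t.Nodup) :
    PySem.Set.equal s t = true ↔
      PySem.List.sorted s (fun v => v) = PySem.List.sorted t (fun v => v) := by
  constructor
  · intro h
    have hmem := (PySem.Set.equal_iff s t).mp h
    have hperm : s.Perm t := (List.perm_ext_iff_of_nodup hs ht).mpr hmem
    have hp1 : (PySem.List.sorted t (fun v => v)).Perm s :=
      ((PySem.List.sorted_perm t (fun v => v) false).trans hperm.symm)
    have hnd : (PySem.List.sorted t (fun v => v)).Nodup :=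
      (PySem.List.sorted_perm t (fun v => v) false).nodup_iff.mpr ht
    have hlt : (PySem.List.sorted t (fun v => v)).Pairwise (fun a b => (a : Int) < b) := by
      have hle := PySem.List.sorted_pairwise t (fun v => v)
      exact hle.imp₂ (fun a b hab hne => lt_of_le_of_ne hab hne) hnd
    exact PySem.List.sorted_eq_of_perm_of_pairwise_lt s _ (fun v => v) hp1 hlt
  · intro h
    apply (PySem.Set.equal_iff s t).mpr
    intro x
    have hperm : s.Perm t := by
      have h1 := PySem.List.sorted_perm s (fun v => v) false
      have h2 := PySem.List.sorted_perm t (fun v => v) false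
      exact (h1.symm.trans (h ▸ h2))
    exact hperm.mem_iff

theorem sorted_pyRange (n : Int) :
    PySem.List.sorted (PySem.Set.ofList (PySem.List.pyRange 0 n)) (fun v => v) = PySem.List.pyRange 0 n := by
  rw [PySem.Set.ofList_eq_self_of_nodup _ (PySem.List.nodup_pyRange_one 0 n)]
  exact PySem.List.sorted_eq_of_perm_of_pairwise_lt _ _ _ (List.Perm.refl _)
    (PySem.List.pairwise_lt_pyRange_one 0 n)

-- L5: B's grouping key of y is the sorted value of A's ann(ann(y))
theorem pvAnnAnnKey_eq (n y : Int) (zero_divisors : List (Int × Int)) :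
    pvAnnAnnKey n (pvAnnMap zero_divisors) y =
      PySem.List.sorted (get_ann_of_set (get_ann y n zero_divisors) n zero_divisors) (fun v => v) := by
  unfold pvAnnAnnKey
  rw [pvAnnMap_getD _ _ n]
  cases hy : get_ann y n zero_divisors with
  | nil => simp [get_ann_of_set, sorted_pyRange]
  | cons h t =>
    simp only
    rw [get_ann_of_set_cons, pvAnnMap_getD _ _ n,
      PySem.Set.ofList_eq_self_of_nodup _ (nodup_get_ann h n zero_divisors)]
    congr 1
    exact PySem.List.foldl_congr_mem _ _ _ _ (fun acc i _ => by rw [pvAnnMap_getD _ _ n])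

-- a getD after A's insert-keyed-by-element dict comprehension
theorem getD_foldl_insert_fun (l : List Int) (f : Int → PySem.Set Int)
    (d : PySem.Dict Int (PySem.Set Int)) (x : Int) :
    (l.foldl (fun d i => d.insert i (f i)) d).getD x PySem.Set.empty =
      if x ∈ l then f x else d.getD x PySem.Set.empty := by
  induction l generalizing d with
  | nil => simp
  | cons i l ih =>
    simp only [List.foldl_cons, ih, PySem.Dict.getD_insert, List.mem_cons]
    by_cases h1 : x ∈ l <;> by_cases h2 : x = i <;> simp [h1, h2]

-- L6: the groups dict at key k holds exactly the y's of range(n) whose key is k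
theorem groups_getD (n : Int) (K : Int → List Int) (k : List Int) :
    ((PySem.List.pyRange 0 n).foldl
        (fun d y => d.modify (K y) [] (fun l => l ++ [y])) PySem.Dict.empty).getD k []
      = (PySem.List.pyRange 0 n).filter (fun y => K y == k) := by
  have := PySem.Dict.getD_foldl_modify_append
    ((PySem.List.pyRange 0 n).map (fun y => (K y, y))) (PySem.Dict.empty) k
  rw [List.foldl_map] at this
  rw [this]
  simp [List.filter_map, List.map_map, Function.comp_def]

-- the two membership tests agree for every x
theorem per_x (n x : Int) (zero_divisors : List (Int × Int)) :
    (PySem.List.pyRange 0 n).filter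
        (fun y => pvAnnAnnKey n (pvAnnMap zero_divisors) y
          == PySem.List.sorted (get_ann x n zero_divisors) (fun v => v))
      = (PySem.List.pyRange 0 n).filter
        (fun y => PySem.Set.equal (get_ann x n zero_divisors)
          (get_ann_of_set (get_ann y n zero_divisors) n zero_divisors)) := by
  apply List.filter_congr
  intro y _
  rw [pvAnnAnnKey_eq, Bool.eq_iff_iff, beq_iff_eq,
    set_equal_iff_sorted_eq _ _ (nodup_get_ann x n zero_divisors)
      (nodup_get_ann_of_set _ n zero_divisors)]
  exact eq_comm

theorem ports_eq (n : Int) (zero_divisors : List (Int × Int)) :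
    get_exact_zero_divisors n zero_divisors = get_exact_zero_divisors_alt n zero_divisors := by
  unfold get_exact_zero_divisors get_exact_zero_divisors_alt
  simp only
  refine PySem.List.foldl_congr_mem _ _ _ _ ?_
  intro acc x hx
  rw [pvAnnMap_getD _ _ n, groups_getD, PySem.List.foldl_append_singleton_eq_map, per_x]
  calc (PySem.List.pyRange 0 n).foldl
        (fun acc y => if PySem.Set.equal
            (((PySem.List.pyRange 0 n).foldl (fun d i => d.insert i (get_ann i n zero_divisors)) PySem.Dict.empty).getD x PySem.Set.empty)
            (((PySem.List.pyRange 0 n).foldl (fun d i => d.insert i (get_ann_of_set (((PySem.List.pyRange 0 n).foldl (fun d i => d.insert i (get_ann i n zero_divisors)) PySem.Dict.empty).getD i PySem.Set.empty) n zero_divisors)) PySem.Dict.empty).getD y PySem.Set.empty)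
          then acc ++ [(x, y)] else acc) acc
      = (PySem.List.pyRange 0 n).foldl
        (fun acc y => if PySem.Set.equal (get_ann x n zero_divisors)
            (get_ann_of_set (get_ann y n zero_divisors) n zero_divisors)
          then acc ++ [(x, y)] else acc) acc := by
        refine PySem.List.foldl_congr_mem _ _ _ _ ?_
        intro acc2 y hy
        rw [getD_foldl_insert_fun, getD_foldl_insert_fun, if_pos hx, if_pos hy,
          getD_foldl_insert_fun, if_pos hy]
    _ = acc ++ ((PySem.List.pyRange 0 n).filter
          (fun y => PySem.Set.equal (get_ann x n zero_divisors)
            (get_ann_of_set (get_ann y n zero_divisors) n zero_divisors))).map (fun y => (x, y)) :=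
        PySem.List.foldl_append_if _ _ _ _

-- ===== VERDICT (by name: the statement is the Claim_ definition above) =====
theorem get_exact_zero_divisors_spec : Claim_equal_get_exact_zero_divisors := by
  intro n zero_divisors _
  unfold Spec_get_exact_zero_divisors
  exact ports_eq n zero_divisors
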